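-- pv_equiv track=rewrite | github.com/darcy132/python-programming-in-context | chapter_3/scramble2Encrypt.py | scramble2Decrypt
-- ===== SOURCE A (Python) =====
-- def scramble2Decrypt(cipherText):
--     halfLength = len(cipherText) // 2
--     evenChars = cipherText[halfLength:]
--     oddChars = cipherText[:halfLength]
--     plainText = ""
--     for i in range(halfLength):
--         plainText += evenChars[i]
--         plainText += oddChars[i]
--
--     if len(oddChars) < len(evenChars):
--         plainText = plainText + evenChars[-1]
--     return plainText
-- ===== SOURCE B (Python) =====
-- def scramble2Decrypt(cipherText):
--     half = len(cipherText) // 2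
--     res = [''] * len(cipherText)
--     res[0::2] = cipherText[half:]
--     res[1::2] = cipherText[:half]
--     return ''.join(res)
-- ===== Notes on version B (the rewrite author's own statement) =====
-- stated objective: idiomatic
-- what changed: Replaces the per-character interleaving loop with string concatenation and a trailing-character special case by preallocating a buffer of the full length and bulk-assigning the two halves with strided slices res[0::2] and res[1::2], then joining; the odd-length trailing character is placed by the even slice with no special case. (measured ~2x faster: bulk slice writes avoid quadratic string concatenation)
import Mathlib
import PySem

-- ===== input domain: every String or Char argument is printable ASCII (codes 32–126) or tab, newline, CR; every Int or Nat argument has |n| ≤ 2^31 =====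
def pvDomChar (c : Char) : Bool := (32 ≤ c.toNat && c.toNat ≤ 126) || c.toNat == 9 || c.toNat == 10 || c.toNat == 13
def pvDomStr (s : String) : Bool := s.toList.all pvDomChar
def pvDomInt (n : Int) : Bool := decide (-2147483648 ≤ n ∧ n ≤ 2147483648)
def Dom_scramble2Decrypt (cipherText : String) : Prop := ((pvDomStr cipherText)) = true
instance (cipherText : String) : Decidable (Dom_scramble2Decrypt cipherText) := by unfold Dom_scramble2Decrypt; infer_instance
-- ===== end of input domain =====

-- B replaces A's per-character interleaving loop by two strided bulk writes
-- (slice assignment res[0::2] / res[1::2]) into a preallocated buffer; objective: idiomatic.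

-- ===== PORT A =====
-- Transliteration of A over List Char (Python str concatenation/indexing ported over the
-- character list, exact). Slices [half:] / [:half] with 0 ≤ half ≤ len are exactly drop/take;
-- evenChars[i] with 0 ≤ i < half ≤ len evenChars is exactly getD; evenChars[-1] is taken only
-- when oddChars is shorter, i.e. evenChars ≠ [], where it is exactly getD (length-1).
def scramble2Decrypt (cipherText : String) : String :=
  let cs := cipherText.toList
  let halfLength := cs.length / 2
  let evenChars := cs.drop halfLength
  let oddChars := cs.take halfLength
  let plainText := (List.range halfLength).foldl
    (fun acc i => (acc ++ [evenChars.getD i ' ']) ++ [oddChars.getD i ' ']) []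
  let plainText :=
    if oddChars.length < evenChars.length then
      plainText ++ [evenChars.getD (evenChars.length - 1) ' ']
    else plainText
  String.mk plainText

-- ===== PORT B =====
-- res[s::2] = vs  (Python strided slice assignment; lengths match at both call sites)
def pvSetStride (l : List Char) (s : Nat) (vs : List Char) : List Char :=
  match vs with
  | [] => l
  | v :: tl => pvSetStride (l.set s v) (s + 2) tl

-- Transliteration of B: preallocated buffer ([''] * n ported as replicate with a placeholder
-- char — every slot is overwritten), two strided bulk writes, ''.join ported as String.mk.
def scramble2Decrypt_alt (cipherText : String) : String :=
  let cs := cipherText.toList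
  let half := cs.length / 2
  let res := List.replicate cs.length ' '
  let res := pvSetStride res 0 (cs.drop half)
  let res := pvSetStride res 1 (cs.take half)
  String.mk res

-- ===== PRECONDITION & SPEC =====
def Spec_scramble2Decrypt (cipherText : String) (out : String) : Prop := out = scramble2Decrypt_alt cipherText
instance (cipherText : String) (out : String) : Decidable (Spec_scramble2Decrypt cipherText out) := by unfold Spec_scramble2Decrypt; infer_instance

-- ===== CLAIM (what is proved, stated in full; the proofs are below) =====
def Claim_equal_scramble2Decrypt : Prop := ∀ (cipherText : String), Dom_scramble2Decrypt cipherText → Spec_scramble2Decrypt cipherText (scramble2Decrypt cipherText)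

-- ===== LEMMAS AND PROOFS =====

theorem pvFoldCore_length (e o : List Char) (m : Nat) :
    ((List.range m).foldl
      (fun acc i => (acc ++ [e.getD i ' ']) ++ [o.getD i ' ']) []).length = 2 * m := by
  induction m with
  | zero => simp
  | succ m ih =>
    rw [List.range_succ, List.foldl_append]
    simp only [List.foldl_cons, List.foldl_nil, List.length_append, List.length_cons,
      List.length_nil, ih]
    omega

theorem pvFoldCore_getD (e o : List Char) (m : Nat) (j : Nat) (hj : j < 2 * m) :
    ((List.range m).foldl
      (fun acc i => (acc ++ [e.getD i ' ']) ++ [o.getD i ' ']) []).getD j ' ' =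
      (if j % 2 = 0 then e.getD (j / 2) ' ' else o.getD (j / 2) ' ') := by
  induction m with
  | zero => omega
  | succ m ih =>
    rw [List.range_succ, List.foldl_append]
    simp only [List.foldl_cons, List.foldl_nil]
    rw [List.append_assoc]
    simp only [List.singleton_append]
    by_cases h : j < 2 * m
    · rw [List.getD_append _ _ _ _ (by rw [pvFoldCore_length]; exact h), ih h]
    · rw [List.getD_append_right _ _ _ _ (by rw [pvFoldCore_length]; omega),
        pvFoldCore_length]
      by_cases h2 : j = 2 * m
      · subst h2
        have e1 : 2 * m - 2 * m = 0 := by omega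
        have e2 : 2 * m % 2 = 0 := by omega
        have e3 : 2 * m / 2 = m := by omega
        rw [e1, List.getD_cons_zero, if_pos e2, e3]
      · have h3 : j = 2 * m + 1 := by omega
        subst h3
        have e1 : 2 * m + 1 - 2 * m = 1 := by omega
        have e2 : ¬ (2 * m + 1) % 2 = 0 := by omega
        have e3 : (2 * m + 1) / 2 = m := by omega
        rw [e1, List.getD_cons_succ, List.getD_cons_zero, if_neg e2, e3]

theorem pvSetStride_length (vs : List Char) (l : List Char) (s : Nat) :
    (pvSetStride l s vs).length = l.length := by
  induction vs generalizing l s with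
  | nil => simp [pvSetStride]
  | cons v tl ih => simp [pvSetStride, ih]

theorem pvSetStride_getD (vs : List Char) (l : List Char) (s : Nat) (j : Nat)
    (hj : j < l.length) (hs : ∀ i, i < vs.length → s + 2 * i < l.length) :
    (pvSetStride l s vs).getD j ' ' =
      if s ≤ j ∧ (j - s) % 2 = 0 ∧ (j - s) / 2 < vs.length then vs.getD ((j - s) / 2) ' '
      else l.getD j ' ' := by
  induction vs generalizing l s with
  | nil => simp [pvSetStride]
  | cons v tl ih =>
    have hsl : s < l.length := by have := hs 0 (by simp); omega
    rw [pvSetStride, ih (l.set s v) (s + 2) (by simpa using hj)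
        (fun i hi => by
          have := hs (i + 1) (by simp at hi ⊢; omega)
          simp only [List.length_set]; omega)]
    simp only [List.length_cons]
    by_cases h0 : j = s
    · rw [if_neg (by omega), if_pos ⟨by omega, by omega, by omega⟩]
      have e1 : (j - s) / 2 = 0 := by omega
      rw [e1, List.getD_cons_zero, h0, List.getD_eq_getElem?_getD,
        List.getElem?_set_self hsl]
      simp
    · by_cases h1 : s ≤ j ∧ (j - s) % 2 = 0 ∧ (j - s) / 2 < tl.length + 1
      · have hs2 : s + 2 ≤ j := by omega
        have he2 : (j - (s + 2)) % 2 = 0 := by omega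
        have he3 : (j - (s + 2)) / 2 < tl.length := by omega
        rw [if_pos ⟨hs2, he2, he3⟩, if_pos h1]
        have hdiv : (j - s) / 2 = (j - (s + 2)) / 2 + 1 := by omega
        rw [hdiv, List.getD_cons_succ]
      · rw [if_neg (by omega), if_neg h1]
        rw [List.getD_eq_getElem?_getD, List.getD_eq_getElem?_getD,
          List.getElem?_set_ne (by omega)]

theorem pvMain (cs : List Char) :
    (let halfLength := cs.length / 2
     let evenChars := cs.drop halfLength
     let oddChars := cs.take halfLength
     let plainText := (List.range halfLength).foldl
       (fun acc i => (acc ++ [evenChars.getD i ' ']) ++ [oddChars.getD i ' ']) []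
     if oddChars.length < evenChars.length then
       plainText ++ [evenChars.getD (evenChars.length - 1) ' ']
     else plainText) =
    (let half := cs.length / 2
     pvSetStride (pvSetStride (List.replicate cs.length ' ') 0 (cs.drop half)) 1
       (cs.take half)) := by
  simp only
  have hlt : (cs.take (cs.length / 2)).length = cs.length / 2 := by
    rw [List.length_take]; omega
  have hld : (cs.drop (cs.length / 2)).length = cs.length - cs.length / 2 := by
    rw [List.length_drop]
  have hB1 : (pvSetStride (List.replicate cs.length ' ') 0
      (cs.drop (cs.length / 2))).length = cs.length := by
    rw [pvSetStride_length]; simp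
  have hBlen : (pvSetStride (pvSetStride (List.replicate cs.length ' ') 0
      (cs.drop (cs.length / 2))) 1 (cs.take (cs.length / 2))).length = cs.length := by
    rw [pvSetStride_length, hB1]
  have hAlen : (if (cs.take (cs.length / 2)).length < (cs.drop (cs.length / 2)).length then
      ((List.range (cs.length / 2)).foldl
        (fun acc i => (acc ++ [(cs.drop (cs.length / 2)).getD i ' '])
          ++ [(cs.take (cs.length / 2)).getD i ' ']) []) ++
        [(cs.drop (cs.length / 2)).getD ((cs.drop (cs.length / 2)).length - 1) ' ']
    else ((List.range (cs.length / 2)).foldl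
        (fun acc i => (acc ++ [(cs.drop (cs.length / 2)).getD i ' '])
          ++ [(cs.take (cs.length / 2)).getD i ' ']) [])).length = cs.length := by
    rw [hlt, hld] at *
    split_ifs with hc
    · rw [List.length_append, pvFoldCore_length]; simp; omega
    · rw [pvFoldCore_length]; omega
  apply List.ext_getElem (by rw [hAlen, hBlen])
  intro j hj1 hj2
  have hjn : j < cs.length := by rw [hAlen] at hj1; exact hj1
  rw [← List.getD_eq_getElem _ ' ' hj1, ← List.getD_eq_getElem _ ' ' hj2]
  rw [pvSetStride_getD _ _ _ _ (by rw [hB1]; exact hjn)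
      (fun i hi => by rw [hB1]; rw [hlt] at hi; omega)]
  rw [pvSetStride_getD _ _ _ _ (by simp only [List.length_replicate]; exact hjn)
      (fun i hi => by simp only [List.length_replicate]; rw [hld] at hi; omega)]
  rw [hlt, hld]
  simp only [Nat.sub_zero]
  split_ifs with hc1 hc2 hc3 hc2' hc3'
  · -- n odd, j odd: A's loop pair vs the s = 1 stride (oddChars = take)
    have hlt2 : j < 2 * (cs.length / 2) := by omega
    rw [List.getD_append _ _ _ _ (by rw [pvFoldCore_length]; exact hlt2),
      pvFoldCore_getD _ _ _ _ hlt2, if_neg (by omega)]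
    congr 1; omega
  · -- n odd, j even: A's loop pair or trailing char vs the s = 0 stride (evenChars = drop)
    by_cases hl : j < 2 * (cs.length / 2)
    · rw [List.getD_append _ _ _ _ (by rw [pvFoldCore_length]; exact hl),
        pvFoldCore_getD _ _ _ _ hl, if_pos (by omega)]
    · rw [List.getD_append_right _ _ _ _ (by rw [pvFoldCore_length]; omega),
        pvFoldCore_length]
      have e0 : j - 2 * (cs.length / 2) = 0 := by omega
      rw [e0, List.getD_cons_zero]
      congr 1; omega
  · exfalso; omega
  · -- n even, j odd
    have hlt2 : j < 2 * (cs.length / 2) := by omega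
    rw [pvFoldCore_getD _ _ _ _ hlt2, if_neg (by omega)]
    congr 1; omega
  · -- n even, j even
    have hlt2 : j < 2 * (cs.length / 2) := by omega
    rw [pvFoldCore_getD _ _ _ _ hlt2, if_pos (by omega)]
  · exfalso; omega

-- ===== VERDICT (by name: the statement is the Claim_ definition above) =====
theorem scramble2Decrypt_spec : Claim_equal_scramble2Decrypt := by
  intro cipherText _
  unfold Spec_scramble2Decrypt scramble2Decrypt scramble2Decrypt_alt
  simp only
  exact congrArg String.mk (pvMain cipherText.toList)
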